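-- pv_equiv track=rewrite | github.com/bobboyms/card-to-speach | main.py | primary_stress_phone_index
-- ===== SOURCE A (Python) =====
-- def primary_stress_phone_index(pron):
--     for i, p in enumerate(pron):
--         if p.endswith("1"):
--             return i
--     for i, p in enumerate(pron):
--         if p.endswith("2"):
--             return i
--     return None
-- ===== SOURCE B (Python) =====
-- def primary_stress_phone_index(pron):
--     sec = None
--     for i, p in enumerate(pron):
--         if p.endswith("1"):
--             return i
--         if sec is None and p.endswith("2"):
--             sec = i
--     return sec
-- ===== Notes on version B (the rewrite author's own statement) =====
-- stated objective: alternative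
-- what changed: Single pass over enumerate(pron) returning immediately on a primary-stress phoneme while remembering the first secondary-stress index, instead of two sequential scans.
import Mathlib
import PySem

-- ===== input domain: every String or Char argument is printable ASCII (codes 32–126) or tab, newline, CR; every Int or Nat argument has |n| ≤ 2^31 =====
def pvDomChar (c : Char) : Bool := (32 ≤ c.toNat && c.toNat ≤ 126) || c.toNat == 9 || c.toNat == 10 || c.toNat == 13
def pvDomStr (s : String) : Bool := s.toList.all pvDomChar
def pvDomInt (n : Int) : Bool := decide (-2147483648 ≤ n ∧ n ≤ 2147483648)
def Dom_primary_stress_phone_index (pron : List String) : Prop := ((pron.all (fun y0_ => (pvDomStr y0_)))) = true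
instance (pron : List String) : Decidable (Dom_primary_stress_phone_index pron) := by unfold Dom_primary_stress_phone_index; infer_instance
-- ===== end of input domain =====

-- B makes one pass that returns on the first '1'-suffixed phoneme and remembers the first '2'-suffixed index, instead of A's two sequential scans; same return value everywhere.


-- ===== PORT A =====
-- first loop of A: return i on the first p ending with "1"
def pvALoop1 : List (Int × String) → Option Int
  | [] => none
  | (i, p) :: rest => if PySem.Str.endswith p "1" then some i else pvALoop1 rest

-- second loop of A: return i on the first p ending with "2"
def pvALoop2 : List (Int × String) → Option Int
  | [] => none
  | (i, p) :: rest => if PySem.Str.endswith p "2" then some i else pvALoop2 rest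

def primary_stress_phone_index (pron : List String) : Option Int :=
  match pvALoop1 (PySem.List.enumerate pron) with
  | some i => some i
  | none => pvALoop2 (PySem.List.enumerate pron)

-- ===== PORT B =====
-- single pass: return on '1'; remember first '2' index in sec
def pvBLoop : List (Int × String) → Option Int → Option Int
  | [], sec => sec
  | (i, p) :: rest, sec =>
    if PySem.Str.endswith p "1" then some i
    else pvBLoop rest (if sec.isNone && PySem.Str.endswith p "2" then some i else sec)

def primary_stress_phone_index_alt (pron : List String) : Option Int :=
  pvBLoop (PySem.List.enumerate pron) none

-- ===== PRECONDITION & SPEC =====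
def Spec_primary_stress_phone_index (pron : List String) (out : Option Int) : Prop := out = primary_stress_phone_index_alt pron
instance (pron : List String) (out : Option Int) : Decidable (Spec_primary_stress_phone_index pron out) := by unfold Spec_primary_stress_phone_index; infer_instance

-- ===== CLAIM (what is proved, stated in full; the proofs are below) =====
def Claim_equal_primary_stress_phone_index : Prop := ∀ (pron : List String), Dom_primary_stress_phone_index pron → Spec_primary_stress_phone_index pron (primary_stress_phone_index pron)

-- ===== LEMMAS AND PROOFS =====

theorem pvBLoop_eq (l : List (Int × String)) : ∀ (sec : Option Int),
    pvBLoop l sec =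
      match pvALoop1 l with
      | some i => some i
      | none => match sec with
        | some s => some s
        | none => pvALoop2 l := by
  induction l with
  | nil => intro sec; cases sec <;> rfl
  | cons hd tl ih =>
    intro sec
    obtain ⟨i, p⟩ := hd
    by_cases h1 : PySem.Chars.endswith p.toList ['1']
    · simp [pvBLoop, pvALoop1, h1]
    · by_cases h2 : PySem.Chars.endswith p.toList ['2'] <;>
        cases sec <;>
          simp [pvBLoop, pvALoop1, pvALoop2, h1, h2, ih]

-- ===== VERDICT (by name: the statement is the Claim_ definition above) =====
theorem primary_stress_phone_index_spec : Claim_equal_primary_stress_phone_index := by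
  intro pron _
  unfold Spec_primary_stress_phone_index primary_stress_phone_index primary_stress_phone_index_alt
  rw [pvBLoop_eq]
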